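-- pv_equiv track=rewrite | github.com/CxsGhost/Algorithms-and-big-data-projects | ACM打榜/字典问题.py | wash_data
-- ===== SOURCE A (Python) =====
-- import string
--
-- def wash_data(s):
--     for k in string.punctuation:
--         s = s.replace(k, " ")
--     for n in range(10):
--         s = s.replace(str(n), " ")
--     list_1 = s.lower().split(' ')
--     set_1 = set(list_1)
--     return set_1
-- ===== SOURCE B (Python) =====
-- import string
--
-- _SEP = frozenset(string.punctuation + string.digits + " ")
--
-- def wash_data(s):
--     # single left-to-right scan: build each word directly and add it to the set
--     # at every separator, instead of staged whole-string rewrites and a split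
--     words = set()
--     buf = []
--     for ch in s:
--         if ch in _SEP:
--             words.add("".join(buf).lower())
--             buf = []
--         else:
--             buf.append(ch)
--     words.add("".join(buf).lower())
--     return words
-- ===== Notes on version B (the rewrite author's own statement) =====
-- stated objective: alternative
-- what changed: Replaces A's 42 staged whole-string .replace passes followed by lower/split/set with a single left-to-right scan that builds each word in a buffer and adds it to the result set at every separator character.
import Mathlib
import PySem

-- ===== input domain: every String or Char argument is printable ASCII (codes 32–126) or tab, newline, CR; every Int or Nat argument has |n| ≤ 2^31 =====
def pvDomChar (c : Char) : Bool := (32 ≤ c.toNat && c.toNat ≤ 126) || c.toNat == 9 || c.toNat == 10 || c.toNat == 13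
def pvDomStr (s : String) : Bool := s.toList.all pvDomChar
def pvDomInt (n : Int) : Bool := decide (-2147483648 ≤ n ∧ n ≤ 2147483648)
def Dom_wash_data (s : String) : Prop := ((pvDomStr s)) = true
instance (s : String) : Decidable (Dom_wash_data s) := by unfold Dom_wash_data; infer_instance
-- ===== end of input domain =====

-- B replaces A's 42 staged whole-string replace passes + lower/split/set by one
-- left-to-right scan that builds each word in a buffer and adds it to the set
-- at every separator character (punctuation, digit or space).

-- string.punctuation
def pvPunct : String := "!\"#$%&'()*+,-./:;<=>?@[\\]^_`{|}~"

-- ===== PORT A =====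
def wash_data (s : String) : List String :=
  let s1 := pvPunct.toList.foldl (fun t k => PySem.Str.replace t (String.ofList [k]) " ") s
  let s2 := (PySem.List.pyRange 0 10 1).foldl (fun t n => PySem.Str.replace t (PySem.Int.toStr n) " ") s1
  let list_1 := (PySem.Str.split? (PySem.Str.lower s2) " ").getD []
  PySem.Set.ofList list_1

-- ===== PORT B =====
-- _SEP = frozenset(string.punctuation + string.digits + " ")
def pvSepSet : PySem.Set Char := PySem.Set.ofList (pvPunct ++ "0123456789 ").toList

-- one scan: flush the buffer into the set at each separator, once more at the end
def wash_data_alt (s : String) : List String :=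
  let st := s.toList.foldl
    (fun (st : PySem.Set String × List Char) ch =>
      if pvSepSet.contains ch then
        (st.1.add (PySem.Str.lower (String.ofList st.2)), [])
      else
        (st.1, st.2 ++ [ch]))
    (PySem.Set.empty, [])
  st.1.add (PySem.Str.lower (String.ofList st.2))

-- ===== PRECONDITION & SPEC =====
def Spec_wash_data (s : String) (out : List String) : Prop := out = wash_data_alt s
instance (s : String) (out : List String) : Decidable (Spec_wash_data s out) := by unfold Spec_wash_data; infer_instance

-- ===== CLAIM (what is proved, stated in full; the proofs are below) =====
def Claim_equal_wash_data : Prop := ∀ (s : String), Dom_wash_data s → Spec_wash_data s (wash_data s)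

-- ===== LEMMAS AND PROOFS =====

-- A's separator characters: the chars A's replace loops turn into ' ', plus ' ' itself
def pvPD : List Char := (pvPunct ++ "0123456789").toList

-- the char pipeline A applies: replace punctuation/digits by ' ', then lowercase
def pvH (c : Char) : Char := PySem.Chars.lowerChar (if c ∈ pvPD then ' ' else c)

-- the word list B's scan produces, as a recursion (raw words, before lowering)
def pvTokens : List Char → List Char → List (List Char)
  | [], cur => [cur]
  | c :: rest, cur =>
      if c ∈ pvSepSet then cur :: pvTokens rest [] else pvTokens rest (cur ++ [c])

-- split on ' ' as a structural recursion with a reversed-buffer accumulator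
def pvSplitSp : List Char → List Char → List (List Char)
  | [], cur => [cur.reverse]
  | c :: rest, cur =>
      if c = ' ' then cur.reverse :: pvSplitSp rest [] else pvSplitSp rest (c :: cur)

-- replacing a single char by a single char is a character map
lemma replace_go_single (k m : Char) : ∀ (l acc : List Char),
    PySem.Chars.replace.go [k] [m] l.length l acc
      = acc.reverse ++ l.map (fun c => if c = k then m else c) := by
  intro l
  induction l with
  | nil => intro acc; simp [PySem.Chars.replace.go]
  | cons c t ih =>
    intro acc
    show PySem.Chars.replace.go [k] [m] (t.length + 1) (c :: t) acc = _
    rw [PySem.Chars.replace.go]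
    by_cases hc : c = k
    · subst hc
      have hpre : [c].isPrefixOf (c :: t) = true := by simp [List.isPrefixOf]
      rw [if_pos hpre]
      have hd : List.drop [c].length (c :: t) = t := by simp
      rw [hd, ih]
      simp
    · have hpre : [k].isPrefixOf (c :: t) = false := by
        have : (k == c) = false := by
          simp only [beq_eq_false_iff_ne]
          exact fun h => hc h.symm
        simp [List.isPrefixOf, this]
      rw [if_neg (by simp [hpre])]
      rw [ih]
      simp [hc]

lemma replace_single (l : List Char) (k m : Char) :
    PySem.Chars.replace l [k] [m] = l.map (fun c => if c = k then m else c) := by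
  have : PySem.Chars.replace l [k] [m] = PySem.Chars.replace.go [k] [m] l.length l [] := by
    simp [PySem.Chars.replace]
  rw [this, replace_go_single]
  simp

-- a fold of single-char replaces over a string is one membership-driven map
lemma foldl_replace_toList (ks : List Char) : ∀ (s : String),
    (ks.foldl (fun t k => PySem.Str.replace t (String.ofList [k]) " ") s).toList
      = s.toList.map (fun c => if c ∈ ks then ' ' else c) := by
  induction ks with
  | nil => intro s; simp
  | cons k ks ih =>
    intro s
    simp only [List.foldl_cons]
    rw [ih]
    have h1 : (PySem.Str.replace s (String.ofList [k]) " ").toList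
        = s.toList.map (fun c => if c = k then ' ' else c) := by
      rw [PySem.Str.toList_replace]
      have : (String.ofList [k]).toList = [k] := by simp
      rw [this]
      exact replace_single s.toList k ' '
    rw [h1, List.map_map]
    apply List.map_congr_left
    intro c _
    by_cases hc : c = k
    · subst hc; simp
    · simp [hc]

-- the digit loop is the same fold over the ten digit characters
lemma digits_fold (s : String) :
    ((PySem.List.pyRange 0 10 1).foldl (fun t n => PySem.Str.replace t (PySem.Int.toStr n) " ") s)
      = (['0','1','2','3','4','5','6','7','8','9'].foldl
          (fun t k => PySem.Str.replace t (String.ofList [k]) " ") s) := by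
  have hr : PySem.List.pyRange 0 10 1 = [0,1,2,3,4,5,6,7,8,9] := by decide
  rw [hr]
  simp only [List.foldl_cons, List.foldl_nil]
  rfl

-- A's cleaned-and-lowered character list is the single map pvH
lemma washed_toList (s : String) :
    (PySem.Str.lower
      ((PySem.List.pyRange 0 10 1).foldl (fun t n => PySem.Str.replace t (PySem.Int.toStr n) " ")
        (pvPunct.toList.foldl (fun t k => PySem.Str.replace t (String.ofList [k]) " ") s))).toList
      = s.toList.map pvH := by
  rw [PySem.Str.toList_lower, digits_fold, foldl_replace_toList, foldl_replace_toList]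
  unfold PySem.Chars.lower
  rw [List.map_map, List.map_map]
  apply List.map_congr_left
  intro c _
  unfold pvH
  have happ : pvPD = pvPunct.toList ++ ['0','1','2','3','4','5','6','7','8','9'] := by
    unfold pvPD
    rw [String.toList_append]
    simp only [List.append_cancel_left_eq]
    decide
  rw [happ]
  simp only [Function.comp_apply]
  by_cases hp : c ∈ pvPunct.toList
  · simp [hp]
  · by_cases hd : c ∈ (['0','1','2','3','4','5','6','7','8','9'] : List Char)
    · fin_cases hd <;> rfl
    · simp only [List.mem_cons, List.not_mem_nil, or_false] at hd
      simp [List.mem_append, hp, hd]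

-- lowercasing never creates a space
lemma lowerChar_ne_space (c : Char) (h : c ≠ ' ') : PySem.Chars.lowerChar c ≠ ' ' := by
  unfold PySem.Chars.lowerChar
  split_ifs with hu
  · unfold PySem.Chars.isupper at hu
    simp only [Bool.and_eq_true, decide_eq_true_eq] at hu
    have hA : 65 ≤ c.toNat := by
      have := hu.1; rw [Char.le_def] at this; exact this
    intro he
    have ht := congrArg Char.toNat he
    rw [Char.toNat_ofNat] at ht
    have h32 : Char.toNat ' ' = 32 := rfl
    rw [h32] at ht
    split_ifs at ht; omega
  · exact h

-- the separator characters are A's replaced characters plus the space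
lemma seplist_eq : (pvPunct ++ "0123456789 ").toList = pvPD ++ [' '] := by
  unfold pvPD
  rw [String.toList_append, String.toList_append, List.append_assoc]
  congr 1

lemma mem_sepSet (c : Char) : c ∈ pvSepSet ↔ c ∈ pvPD ∨ c = ' ' := by
  unfold pvSepSet
  rw [PySem.Set.mem_ofList, seplist_eq]
  simp

-- membership in B's separator set = the char maps to ' ' under pvH
lemma sep_iff (c : Char) : (c ∈ pvSepSet) ↔ pvH c = ' ' := by
  rw [mem_sepSet]
  constructor
  · intro h
    rcases h with h | h
    · simp [pvH, h]; rfl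
    · subst h
      by_cases hpd : ' ' ∈ pvPD
      · simp [pvH, hpd]; rfl
      · simp [pvH, hpd]; rfl
  · intro h
    by_cases hpd : c ∈ pvPD
    · exact Or.inl hpd
    · right
      by_contra hne
      exact lowerChar_ne_space c hne (by simpa [pvH, hpd] using h)

-- for non-separators pvH is just lowerChar
lemma pvH_nonsep (c : Char) (h : c ∉ pvSepSet) : pvH c = PySem.Chars.lowerChar c := by
  have hpd : c ∉ pvPD := fun hc => h ((mem_sepSet c).mpr (Or.inl hc))
  simp [pvH, hpd]

-- splitOn.go on the single-char separator [' '] computes pvSplitSp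
lemma splitOn_go_sp : ∀ (l cur : List Char) (acc : List (List Char)) (fuel : Nat),
    l.length < fuel →
    PySem.Chars.splitOn.go [' '] fuel l cur acc = acc.reverse ++ pvSplitSp l cur := by
  intro l
  induction l with
  | nil =>
    intro cur acc fuel hf
    cases fuel with
    | zero => omega
    | succ f => simp [PySem.Chars.splitOn.go, pvSplitSp]
  | cons c rest ih =>
    intro cur acc fuel hf
    cases fuel with
    | zero => omega
    | succ f =>
      rw [PySem.Chars.splitOn.go]
      by_cases hc : c = ' '
      · subst hc
        have hpre : ([' '] : List Char).isPrefixOf (' ' :: rest) = true := by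
          simp [List.isPrefixOf]
        rw [if_pos hpre]
        have hd : List.drop ([' '] : List Char).length (' ' :: rest) = rest := by simp
        rw [hd, ih [] (cur.reverse :: acc) f (by simpa using Nat.lt_of_succ_lt_succ hf)]
        simp [pvSplitSp]
      · have hpre : ([' '] : List Char).isPrefixOf (c :: rest) = false := by
          have : (' ' == c) = false := by
            simp only [beq_eq_false_iff_ne]
            exact fun h => hc h.symm
          simp [List.isPrefixOf, this]
        rw [if_neg (by simp [hpre])]
        rw [ih (c :: cur) acc f (by simpa using Nat.lt_of_succ_lt_succ hf)]
        simp [pvSplitSp, hc]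

lemma splitOn_sp (l : List Char) :
    PySem.Chars.splitOn l [' '] = pvSplitSp l [] := by
  unfold PySem.Chars.splitOn
  simpa using splitOn_go_sp l [] [] (l.length + 1) (by omega)

-- splitting the mapped string on ' ' = B's raw tokens, each mapped by lowerChar
lemma splitSp_tokens : ∀ (l cur : List Char),
    pvSplitSp (l.map pvH) ((cur.map PySem.Chars.lowerChar).reverse)
      = (pvTokens l cur).map (List.map PySem.Chars.lowerChar) := by
  intro l
  induction l with
  | nil => intro cur; simp [pvSplitSp, pvTokens]
  | cons c rest ih =>
    intro cur
    simp only [List.map_cons, pvSplitSp, pvTokens]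
    by_cases hs : c ∈ pvSepSet
    · rw [if_pos ((sep_iff c).mp hs), if_pos hs]
      have := ih []
      simp only [List.map_nil, List.reverse_nil] at this
      simp [this]
    · rw [if_neg (fun h => hs ((sep_iff c).mpr h)), if_neg hs]
      have : pvH c :: (cur.map PySem.Chars.lowerChar).reverse
          = (((cur ++ [c]).map PySem.Chars.lowerChar)).reverse := by
        simp [pvH_nonsep c hs]
      rw [this, ih (cur ++ [c])]

-- B's fold, then the final flush, is the Set.add-fold over the lowered tokens
lemma foldB_tokens : ∀ (l cur : List Char) (acc : PySem.Set String),
    (let st := l.foldl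
        (fun (st : PySem.Set String × List Char) ch =>
          if pvSepSet.contains ch then
            (st.1.add (PySem.Str.lower (String.ofList st.2)), [])
          else
            (st.1, st.2 ++ [ch]))
        (acc, cur)
     st.1.add (PySem.Str.lower (String.ofList st.2)))
      = ((pvTokens l cur).map (fun t => PySem.Str.lower (String.ofList t))).foldl
          PySem.Set.add acc := by
  intro l
  induction l with
  | nil => intro cur acc; simp [pvTokens]
  | cons c rest ih =>
    intro cur acc
    simp only [List.foldl_cons, pvTokens]
    by_cases hs : c ∈ pvSepSet
    · have hb : pvSepSet.contains c = true := by
        unfold PySem.Set.contains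
        exact List.contains_iff_mem.mpr hs
      rw [if_pos hs]
      simp only [hb, if_true]
      simpa using ih [] (acc.add (PySem.Str.lower (String.ofList cur)))
    · have hb : pvSepSet.contains c = false := by
        unfold PySem.Set.contains
        rw [Bool.eq_false_iff]
        exact fun h => hs (List.contains_iff_mem.mp h)
      rw [if_neg hs]
      simp only [hb, Bool.false_eq_true, if_false]
      simpa using ih (cur ++ [c]) acc

-- ===== VERDICT (by name: the statement is the Claim_ definition above) =====
theorem wash_data_spec : Claim_equal_wash_data := by
  intro s _
  unfold Spec_wash_data wash_data wash_data_alt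
  simp only []
  -- A's side: one Set.ofList over the split of the mapped string
  have hsplit : PySem.Str.split?
      (PySem.Str.lower
        ((PySem.List.pyRange 0 10 1).foldl (fun t n => PySem.Str.replace t (PySem.Int.toStr n) " ")
          (pvPunct.toList.foldl (fun t k => PySem.Str.replace t (String.ofList [k]) " ") s))) " "
      = some (((pvTokens s.toList []).map (List.map PySem.Chars.lowerChar)).map String.ofList) := by
    rw [PySem.Str.split?]
    have hsep : (" " : String).toList = [' '] := rfl
    rw [hsep, PySem.Chars.split?]
    rw [if_neg (by simp)]
    rw [washed_toList s, splitOn_sp]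
    have hsp := splitSp_tokens s.toList []
    simp only [List.map_nil, List.reverse_nil] at hsp
    rw [hsp]
    simp
  rw [hsplit]
  simp only [Option.getD_some]
  -- B's side: the fold-with-final-flush is the Set.add fold over the tokens
  rw [foldB_tokens s.toList [] PySem.Set.empty]
  -- both are the same Set.add fold over the same string list
  rw [PySem.Set.ofList_eq_foldl, List.map_map]
  show List.foldl PySem.Set.add PySem.Set.empty _ = _
  congr 1
  apply List.map_congr_left
  intro t _
  simp [PySem.Str.lower, PySem.Chars.lower]
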